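-- pv_equiv track=rewrite | github.com/GuilhermeXA/Treinando_Python | Treinando Python 11-09-2023_Exercícios Aula 6/Exercícios Aula 6 - Lista 3/Problema G - Awari 2.0.py | ganhar_o_jogo
-- ===== SOURCE A (Python) =====
-- def ganhar_o_jogo(N, P):
--     dp = [False] * (N + 1)
--     dp[0] = True
--
--     for i in range(1, N + 1):
--         if dp[i - 1] and P[i - 1] > 0:
--             dp[i] = True
--             for j in range(i + 1, min(N + 1, i + P[i - 1] + 1)):
--                 P[j - 1] -= 1
--
--     return dp[N]
-- ===== SOURCE B (Python) =====
-- # B: one pass with a difference array for the range decrements (O(N) instead of O(N*maxP)).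
-- # Equivalence is about the return value only: A mutates P in place, B does not.
-- def ganhar_o_jogo(N, P):
--     diff = [0] * (N + 2)
--     acc = 0
--     for k in range(N):
--         acc += diff[k]
--         cur = P[k] + acc
--         if cur <= 0:
--             return False
--         hi = min(N - 1, k + cur)
--         if k + 1 <= hi:
--             diff[k + 1] -= 1
--             diff[hi + 1] += 1
--     return True
-- ===== Notes on version B (the rewrite author's own statement) =====
-- stated objective: faster
-- what changed: Replaces the dp array and the inner loop that eagerly decrements a range of P in place by a single pass that keeps the pending range decrements in a difference array with a running sum, reading each position once.
-- outside the precondition, e.g. on ganhar_o_jogo(2, [0]): A returns False, B returns False; on ganhar_o_jogo(2, [1]): A raises IndexError, B raises IndexError; on ganhar_o_jogo(-1, []): A raises IndexError, B returns True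
import Mathlib
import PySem

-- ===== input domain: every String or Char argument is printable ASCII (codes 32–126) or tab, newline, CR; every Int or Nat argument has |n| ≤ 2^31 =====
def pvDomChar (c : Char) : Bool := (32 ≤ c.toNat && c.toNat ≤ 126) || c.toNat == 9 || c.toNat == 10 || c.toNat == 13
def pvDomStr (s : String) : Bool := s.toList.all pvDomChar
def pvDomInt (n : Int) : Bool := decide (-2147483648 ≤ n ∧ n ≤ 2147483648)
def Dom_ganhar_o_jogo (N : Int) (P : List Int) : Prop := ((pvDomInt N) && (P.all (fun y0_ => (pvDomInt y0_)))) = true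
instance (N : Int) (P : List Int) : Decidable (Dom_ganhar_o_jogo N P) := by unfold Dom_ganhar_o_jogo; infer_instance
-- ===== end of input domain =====

-- B replaces A's eager in-place range decrements of P (inner loop) by a difference array
-- with a running sum, one pass, point reads; equivalence is about the return value only
-- (the Python A mutates its argument P in place, B does not).

-- ===== PORT A =====
-- one outer-loop iteration of A (i is the Python loop variable)
def pvStepA (N : Int) (st : List Bool × List Int) (i : Int) : List Bool × List Int :=
  if PySem.List.pyGetD st.1 (i - 1) false && decide (0 < PySem.List.pyGetD st.2 (i - 1) 0) then
    let dp' := PySem.List.pySetD st.1 i true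
    let P' := (PySem.List.pyRange (i + 1) (min (N + 1) (i + PySem.List.pyGetD st.2 (i - 1) 0 + 1)) 1).foldl
        (fun Q j => PySem.List.pySetD Q (j - 1) (PySem.List.pyGetD Q (j - 1) 0 - 1)) st.2
    (dp', P')
  else st

def ganhar_o_jogo (N : Int) (P : List Int) : Bool :=
  let dp0 := PySem.List.pySetD (List.replicate (N + 1).toNat false) 0 true
  let st := (PySem.List.pyRange 1 (N + 1) 1).foldl (pvStepA N) (dp0, P)
  PySem.List.pyGetD st.1 N false

-- ===== PORT B =====
-- the 'for k in range(N)' loop of Source B with its early return; rem = remaining iterations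
def pvGoB (P : List Int) (N : Int) : Nat → Nat → Int → List Int → Bool
  | 0, _, _, _ => true
  | rem + 1, k, acc, diff =>
    let acc' := acc + PySem.List.pyGetD diff (k : Int) 0
    let cur := PySem.List.pyGetD P (k : Int) 0 + acc'
    if cur ≤ 0 then false
    else
      let hi := min (N - 1) ((k : Int) + cur)
      if (k : Int) + 1 ≤ hi then
        let d1 := PySem.List.pySetD diff ((k : Int) + 1) (PySem.List.pyGetD diff ((k : Int) + 1) 0 - 1)
        let d2 := PySem.List.pySetD d1 (hi + 1) (PySem.List.pyGetD d1 (hi + 1) 0 + 1)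
        pvGoB P N rem (k + 1) acc' d2
      else
        pvGoB P N rem (k + 1) acc' diff

def ganhar_o_jogo_alt (N : Int) (P : List Int) : Bool :=
  pvGoB P N N.toNat 0 0 (List.replicate (N + 2).toNat 0)

-- ===== PRECONDITION & SPEC =====
-- Pre_ requires 0 ≤ N and N ≤ len(P): A indexes P[i-1] for i up to N whenever the winning
-- chain survives and raises IndexError on shorter lists (and on N < 0 at dp[0]); whether A
-- returns on len(P) < N depends on where the chain dies, so those inputs are excluded even
-- though A sometimes returns False there (and B then returns that same False wherever both return).
def Pre_ganhar_o_jogo (N : Int) (P : List Int) : Prop := 0 ≤ N ∧ N ≤ (P.length : Int)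
instance (N : Int) (P : List Int) : Decidable (Pre_ganhar_o_jogo N P) := by unfold Pre_ganhar_o_jogo; infer_instance

def pvWitness_ganhar_o_jogo : Int × List Int := (2, [1, 2])

def Spec_ganhar_o_jogo (N : Int) (P : List Int) (out : Bool) : Prop := out = ganhar_o_jogo_alt N P
instance (N : Int) (P : List Int) (out : Bool) : Decidable (Spec_ganhar_o_jogo N P out) := by unfold Spec_ganhar_o_jogo; infer_instance

-- ===== CLAIM (what is proved, stated in full; the proofs are below) =====
def Claim_equal_ganhar_o_jogo : Prop := ∀ (N : Int) (P : List Int), Dom_ganhar_o_jogo N P → Pre_ganhar_o_jogo N P → Spec_ganhar_o_jogo N P (ganhar_o_jogo N P)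

-- ===== LEMMAS AND PROOFS =====

theorem pvGetD_replicate {α : Type} (c m : Nat) (x : α) : (List.replicate c x).getD m x = x := by
  simp [List.getD, List.getElem?_replicate]
  split <;> simp

theorem pvGetD_set {α : Type} (l : List α) (p m : Nat) (v d : α) :
    (l.set p v).getD m d = if m = p ∧ p < l.length then v else l.getD m d := by
  simp [List.getD, List.getElem?_set]
  by_cases h : p = m
  · subst h; by_cases h2 : p < l.length <;> simp [h2]
  · have : ¬ (m = p ∧ p < l.length) := by tauto
    simp [h, this]

theorem pvInner_aux (n : Nat) : ∀ (a b : Int), (b - a).toNat = n → 1 ≤ a → ∀ (Q : List Int),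
    (((PySem.List.pyRange a b 1).foldl
      (fun Q j => PySem.List.pySetD Q (j - 1) (PySem.List.pyGetD Q (j - 1) 0 - 1)) Q).length = Q.length)
    ∧ (∀ m : Nat, ((PySem.List.pyRange a b 1).foldl
      (fun Q j => PySem.List.pySetD Q (j - 1) (PySem.List.pyGetD Q (j - 1) 0 - 1)) Q).getD m 0
      = Q.getD m 0 - (if a ≤ (m : Int) + 1 ∧ (m : Int) + 1 < b ∧ m < Q.length then 1 else 0)) := by
  induction n with
  | zero =>
    intro a b hn ha Q
    rw [PySem.List.pyRange_one_eq_nil (by omega)]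
    constructor
    · simp
    · intro m
      have : ¬ (a ≤ (m : Int) + 1 ∧ (m : Int) + 1 < b ∧ m < Q.length) := by omega
      simp [this]
  | succ n ih =>
    intro a b hn ha Q
    rw [PySem.List.pyRange_one_cons (by omega), List.foldl_cons]
    have hstep : PySem.List.pySetD Q (a - 1) (PySem.List.pyGetD Q (a - 1) 0 - 1)
        = Q.set (a - 1).toNat (Q.getD (a - 1).toNat 0 - 1) := by
      rw [PySem.List.pySetD_of_nonneg Q _ (by omega), PySem.List.pyGetD_of_nonneg Q _ (by omega)]
    rw [hstep]
    set Q' := Q.set (a - 1).toNat (Q.getD (a - 1).toNat 0 - 1) with hQ'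
    have hlen' : Q'.length = Q.length := by simp [hQ']
    obtain ⟨ihl, ihg⟩ := ih (a + 1) b (by omega) (by omega) Q'
    refine ⟨by rw [ihl, hlen'], ?_⟩
    intro m
    rw [ihg m, hlen', hQ', pvGetD_set]
    by_cases hm : m = (a - 1).toNat ∧ (a - 1).toNat < Q.length
    · have h2 : ¬ (a + 1 ≤ (m : Int) + 1 ∧ (m : Int) + 1 < b ∧ m < Q.length) := by omega
      have h3 : a ≤ (m : Int) + 1 ∧ (m : Int) + 1 < b ∧ m < Q.length := by
        refine ⟨by omega, by omega, by omega⟩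
      rw [if_pos hm, if_neg h2, if_pos h3, ← hm.1]; ring
    · rw [if_neg hm]
      by_cases hc : (m : Int) + 1 = a
      · have hl : ¬ (a + 1 ≤ (m : Int) + 1 ∧ (m : Int) + 1 < b ∧ m < Q.length) := by omega
        have hr : ¬ (a ≤ (m : Int) + 1 ∧ (m : Int) + 1 < b ∧ m < Q.length) := by
          intro h; exact hm ⟨by omega, by omega⟩
        rw [if_neg hl, if_neg hr]
      · by_cases hr : a ≤ (m : Int) + 1 ∧ (m : Int) + 1 < b ∧ m < Q.length
        · rw [if_pos ⟨by omega, hr.2.1, hr.2.2⟩, if_pos hr]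
        · rw [if_neg (fun h => hr ⟨by omega, h.2.1, h.2.2⟩), if_neg hr]

-- prefix sums of the difference array: sum of the first n entries
def pvPfx (l : List Int) (n : Nat) : Int := ((List.range n).map (fun t => l.getD t 0)).sum
theorem pvPfx_succ (l : List Int) (n : Nat) : pvPfx l (n + 1) = pvPfx l n + l.getD n 0 := by
  simp [pvPfx, List.range_succ]
theorem pvPfx_replicate (c n : Nat) : pvPfx (List.replicate c (0 : Int)) n = 0 := by
  induction n with
  | zero => simp [pvPfx]
  | succ n ih =>
    have : pvPfx (List.replicate c (0 : Int)) (n + 1)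
        = pvPfx (List.replicate c (0 : Int)) n + (List.replicate c (0 : Int)).getD n 0 := by
      simp [pvPfx, List.range_succ]
    rw [this, ih, pvGetD_replicate]; ring

theorem pvPfx_set (l : List Int) (p : Nat) (v : Int) (hp : p < l.length) (n : Nat) :
    pvPfx (l.set p v) n = pvPfx l n + (if p < n then v - l.getD p 0 else 0) := by
  induction n with
  | zero => simp [pvPfx]
  | succ n ih =>
    rw [pvPfx_succ, pvPfx_succ, ih, pvGetD_set]
    by_cases h1 : p < n
    · have : p < n + 1 := by omega
      have hne : ¬ (n = p ∧ p < l.length) := by omega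
      simp [h1, this, hne]; ring
    · by_cases h2 : n = p
      · subst h2; simp [hp]
      · have : ¬ p < n + 1 := by omega
        simp [h1, this, h2]

theorem pvFold_dead (N : Int) (l : List Int) (dp : List Bool) (Pa : List Int)
    (h : ∀ i ∈ l, PySem.List.pyGetD dp (i - 1) false = false) :
    l.foldl (pvStepA N) (dp, Pa) = (dp, Pa) := by
  induction l with
  | nil => rfl
  | cons x xs ih =>
    rw [List.foldl_cons]
    have hx := h x (by simp)
    have hstep : pvStepA N (dp, Pa) x = (dp, Pa) := by simp [pvStepA, hx]
    rw [hstep]; exact ih (fun i hi => h i (by simp [hi]))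

theorem pvMain (N : Int) (hN : 0 ≤ N) (P0 : List Int) (hlen : N ≤ (P0.length : Int)) :
    ∀ (rem k : Nat) (acc : Int) (diff : List Int) (dp : List Bool) (Pa : List Int),
      (k : Int) + rem = N →
      dp.length = N.toNat + 1 →
      (∀ m : Nat, dp.getD m false = decide (m ≤ k)) →
      Pa.length = P0.length →
      diff.length = (N + 2).toNat →
      (∀ m : Nat, k ≤ m → m < N.toNat →
        Pa.getD m 0 = P0.getD m 0 + acc + (pvPfx diff (m + 1) - pvPfx diff k)) →
      PySem.List.pyGetD ((PySem.List.pyRange ((k : Int) + 1) (N + 1) 1).foldl (pvStepA N) (dp, Pa)).1 N false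
        = pvGoB P0 N rem k acc diff := by
  intro rem
  induction rem with
  | zero =>
    intro k acc diff dp Pa hk hdpl hdp hPal hdl hIP
    rw [PySem.List.pyRange_one_eq_nil (by omega), List.foldl_nil]
    have : (N : Int) = ((k : Nat) : Int) := by omega
    rw [pvGoB, this, PySem.List.pyGetD_natCast, hdp k]
    simp
  | succ rem ih =>
    intro k acc diff dp Pa hk hdpl hdp hPal hdl hIP
    have hkN : (k : Int) < N := by omega
    have hkN' : k < N.toNat := by omega
    -- value A reads at position k equals B's cur
    have hPak : Pa.getD k 0 = P0.getD k 0 + (acc + diff.getD k 0) := by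
      have := hIP k (le_refl k) hkN'
      rw [this, pvPfx_succ]; ring
    rw [PySem.List.pyRange_one_cons (by omega), List.foldl_cons]
    have hi1 : (k : Int) + 1 - 1 = ((k : Nat) : Int) := by ring
    by_cases hcur : P0.getD k 0 + (acc + diff.getD k 0) ≤ 0
    · -- A's chain dies here; B returns False
      have h1 : ¬ (0 < Pa.getD k 0) := by omega
      have hb : decide (0 < Pa.getD k 0) = false := decide_eq_false h1
      have hcond : pvStepA N (dp, Pa) ((k : Int) + 1) = (dp, Pa) := by
        unfold pvStepA
        simp only [hi1, PySem.List.pyGetD_natCast, hb, Bool.and_false, Bool.false_eq_true,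
          if_false]
      rw [hcond, pvFold_dead N _ dp Pa ?hdead]
      case hdead =>
        intro i hi
        rw [PySem.List.mem_pyRange_one] at hi
        have h0 : (0:Int) ≤ i - 1 := by omega
        rw [PySem.List.pyGetD_of_nonneg dp false h0, hdp (i-1).toNat]
        simp; omega
      · have hNc : (N : Int) = ((N.toNat : Nat) : Int) := by omega
        rw [hNc, PySem.List.pyGetD_natCast, hdp N.toNat]
        have hfalse : decide (N.toNat ≤ k) = false := by simp; omega
        rw [hfalse, pvGoB]
        simp only [PySem.List.pyGetD_natCast]
        rw [if_pos (by omega : P0.getD k 0 + (acc + diff.getD k 0) ≤ 0)]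
    · -- alive step
      rw [not_le] at hcur
      have h1 : 0 < Pa.getD k 0 := by omega
      have hbt : (dp.getD k false && decide (0 < Pa.getD k 0)) = true := by
        rw [hdp k, decide_eq_true h1]; simp
      have hc1 : ((k : Int) + 1) = (((k + 1 : Nat) : Nat) : Int) := by push_cast; ring
      have hcond : pvStepA N (dp, Pa) ((k : Int) + 1) =
          (dp.set (k + 1) true,
           (PySem.List.pyRange ((k : Int) + 2) (min (N + 1) ((k : Int) + Pa.getD k 0 + 2)) 1).foldl
             (fun Q j => PySem.List.pySetD Q (j - 1) (PySem.List.pyGetD Q (j - 1) 0 - 1)) Pa) := by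
        unfold pvStepA
        simp only [hi1, PySem.List.pyGetD_natCast, hbt, if_true]
        rw [hc1, PySem.List.pySetD_natCast]
        have e1 : ((k + 1 : Nat) : Int) + 1 = (k : Int) + 2 := by push_cast; ring
        have e2 : ((k + 1 : Nat) : Int) + Pa.getD k 0 + 1 = (k : Int) + Pa.getD k 0 + 2 := by
          push_cast; ring
        rw [e1, e2]
      rw [hcond]
      have e3 : ((k : Int) + 1 + 1) = (((k + 1 : Nat) : Int) + 1) := by push_cast; ring
      rw [e3]
      have hdp' : ∀ m : Nat, (dp.set (k + 1) true).getD m false = decide (m ≤ k + 1) := by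
        intro m
        rw [pvGetD_set dp (k + 1) m true false]
        by_cases hmk : m = k + 1
        · subst hmk; simp; omega
        · have : ¬ (m = k + 1 ∧ k + 1 < dp.length) := by tauto
          rw [if_neg this, hdp m]
          simp; omega
      have hPa'len : ((PySem.List.pyRange ((k : Int) + 2) (min (N + 1) ((k : Int) + Pa.getD k 0 + 2)) 1).foldl
          (fun Q j => PySem.List.pySetD Q (j - 1) (PySem.List.pyGetD Q (j - 1) 0 - 1)) Pa).length
          = P0.length := by
        rw [(pvInner_aux _ ((k : Int) + 2) (min (N + 1) ((k : Int) + Pa.getD k 0 + 2)) rfl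
          (by omega) Pa).1, hPal]
      have hnot0 : ¬ (P0.getD k 0 + (acc + diff.getD k 0) ≤ 0) := by omega
      by_cases hcond2 : (k : Int) + 1 ≤ min (N - 1) ((k : Int) + (P0.getD k 0 + (acc + diff.getD k 0)))
      · -- B updates the difference array
        set cur := P0.getD k 0 + (acc + diff.getD k 0) with hcur_def
        set hi := min (N - 1) ((k : Int) + cur) with hhi_def
        set q : Nat := (hi + 1).toNat with hq_def
        set d1 := diff.set (k + 1) (diff.getD (k + 1) 0 - 1) with hd1_def
        set d2 := d1.set q (d1.getD q 0 + 1) with hd2_def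
        have hklen : k + 1 < diff.length := by omega
        have hiub : hi ≤ N - 1 := by rw [hhi_def]; exact min_le_left _ _
        have hqub : q ≤ N.toNat := by omega
        have hd1len : d1.length = diff.length := by rw [hd1_def]; simp
        have hqlen : q < d1.length := by omega
        have hqk : k + 2 ≤ q := by omega
        have hPfx1 : ∀ n, pvPfx d1 n = pvPfx diff n + (if k + 1 < n then -1 else 0) := by
          intro n
          rw [hd1_def, pvPfx_set diff (k + 1) _ hklen n]
          split_ifs <;> ring
        have hPfx2 : ∀ n, pvPfx d2 n = pvPfx d1 n + (if q < n then 1 else 0) := by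
          intro n
          rw [hd2_def, pvPfx_set d1 q _ hqlen n]
          split_ifs <;> ring
        have hIP' : ∀ m : Nat, k + 1 ≤ m → m < N.toNat →
            ((PySem.List.pyRange ((k : Int) + 2) (min (N + 1) ((k : Int) + Pa.getD k 0 + 2)) 1).foldl
              (fun Q j => PySem.List.pySetD Q (j - 1) (PySem.List.pyGetD Q (j - 1) 0 - 1)) Pa).getD m 0
            = P0.getD m 0 + (acc + diff.getD k 0) + (pvPfx d2 (m + 1) - pvPfx d2 (k + 1)) := by
          intro m hm1 hm2
          rw [(pvInner_aux _ ((k : Int) + 2) (min (N + 1) ((k : Int) + Pa.getD k 0 + 2)) rfl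
            (by omega) Pa).2 m]
          rw [hIP m (by omega) hm2, hPak]
          rw [hPfx2, hPfx2, hPfx1, hPfx1, pvPfx_succ diff k]
          have hmlen : m < Pa.length := by omega
          split_ifs <;> omega
        have hd2len : d2.length = (N + 2).toNat := by
          rw [hd2_def]; simp [hd1len, hdl]
        have hrec := ih (k + 1) (acc + diff.getD k 0) d2 (dp.set (k + 1) true) _
          (by push_cast; omega) (by simp [hdpl]) hdp' hPa'len hd2len hIP'
        rw [hrec, pvGoB]
        simp only [PySem.List.pyGetD_natCast]
        rw [if_neg hnot0, if_pos (by omega :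
          (k : Int) + 1 ≤ min (N - 1) ((k : Int) + (P0.getD k 0 + (acc + diff.getD k 0))))]
        have hmin : min (N - 1) ((k : Int) + (P0.getD k 0 + (acc + diff.getD k 0))) = hi := by
          rw [hhi_def, hcur_def]
        rw [hc1, PySem.List.pySetD_natCast, PySem.List.pyGetD_natCast, hmin, ← hd1_def]
        rw [PySem.List.pySetD_of_nonneg d1 _ (by omega : (0 : Int) ≤ hi + 1),
          PySem.List.pyGetD_of_nonneg d1 _ (by omega : (0 : Int) ≤ hi + 1)]
      · -- B leaves the difference array unchanged (empty decrement range)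
        have hIP' : ∀ m : Nat, k + 1 ≤ m → m < N.toNat →
            ((PySem.List.pyRange ((k : Int) + 2) (min (N + 1) ((k : Int) + Pa.getD k 0 + 2)) 1).foldl
              (fun Q j => PySem.List.pySetD Q (j - 1) (PySem.List.pyGetD Q (j - 1) 0 - 1)) Pa).getD m 0
            = P0.getD m 0 + (acc + diff.getD k 0) + (pvPfx diff (m + 1) - pvPfx diff (k + 1)) := by
          intro m hm1 hm2
          exact absurd hcond2 (by omega)
        have hrec := ih (k + 1) (acc + diff.getD k 0) diff (dp.set (k + 1) true) _
          (by push_cast; omega) (by simp [hdpl]) hdp' hPa'len hdl hIP'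
        rw [hrec, pvGoB]
        simp only [PySem.List.pyGetD_natCast]
        rw [if_neg hnot0, if_neg (by omega :
          ¬ ((k : Int) + 1 ≤ min (N - 1) ((k : Int) + (P0.getD k 0 + (acc + diff.getD k 0)))))]


-- ===== VERDICT (by name: the statement is the Claim_ definition above) =====
theorem ganhar_o_jogo_spec : Claim_equal_ganhar_o_jogo := by
  intro N P hdom hpre
  obtain ⟨hN, hlen⟩ := hpre
  unfold Spec_ganhar_o_jogo ganhar_o_jogo ganhar_o_jogo_alt
  have h0 : ((0 : Nat) : Int) + (N.toNat : Int) = N := by omega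
  have hdp0 : PySem.List.pySetD (List.replicate (N + 1).toNat false) 0 true
      = (List.replicate (N + 1).toNat false).set 0 true := by
    rw [PySem.List.pySetD_of_nonneg _ _ (by omega : (0 : Int) ≤ 0)]
    rfl
  have hcast : (1 : Int) = ((0 : Nat) : Int) + 1 := by simp
  rw [hdp0, hcast]
  refine pvMain N hN P hlen N.toNat 0 0 (List.replicate (N + 2).toNat 0)
    ((List.replicate (N + 1).toNat false).set 0 true) P h0 ?_ ?_ rfl ?_ ?_
  · simp; omega
  · intro m
    rw [pvGetD_set]
    by_cases hm : m = 0
    · subst hm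
      have : (0 : Nat) = 0 ∧ 0 < (List.replicate (N + 1).toNat false).length := by
        simp; omega
      rw [if_pos this]; simp
    · have : ¬ ((m : Nat) = 0 ∧ 0 < (List.replicate (N + 1).toNat false).length) := by tauto
      rw [if_neg this, pvGetD_replicate]
      simp; omega
  · simp
  · intro m _ _
    rw [pvPfx_replicate, pvPfx_replicate]; ring
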